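-- pv_equiv track=rewrite | github.com/Raiden-08/code-atlas | src/services/graph.py | get_multi_hop_calls
-- ===== SOURCE A (Python) =====
-- def get_multi_hop_calls(graph, start, max_depth=2):
--     """
--     Perform depth-limited DFS to get multi-hop call chains.
--
--     Returns:
--         list of (depth, function_name)
--     """
--     result = []
--     visited = set()
--
--     def dfs(node, depth):
--         if depth > max_depth or node in visited:
--             return
--
--         visited.add(node)
--
--         for callee in graph.get(node, {}).get("calls", []):
--             result.append((depth, callee))
--             dfs(callee, depth + 1)
--
--     dfs(start, 1)
--     return result
-- ===== SOURCE B (Python) =====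
-- def get_multi_hop_calls(graph, start, max_depth=2):
--     """Iterative depth-limited DFS with an explicit stack of (depth, callee) edges."""
--     result = []
--     if max_depth < 1:
--         return result
--     visited = {start}
--     stack = [(1, c) for c in reversed(graph.get(start, {}).get("calls", []))]
--     while stack:
--         depth, callee = stack.pop()
--         result.append((depth, callee))
--         if depth + 1 <= max_depth and callee not in visited:
--             visited.add(callee)
--             for c in reversed(graph.get(callee, {}).get("calls", [])):
--                 stack.append((depth + 1, c))
--     return result
-- ===== Notes on version B (the rewrite author's own statement) =====
-- stated objective: alternative
-- what changed: The recursive depth-limited DFS (nested closure mutating visited/result) is replaced by an iterative loop over an explicit stack of (depth, callee) edge tasks, pushed in reversed order to preserve the DFS preorder.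
import Mathlib
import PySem

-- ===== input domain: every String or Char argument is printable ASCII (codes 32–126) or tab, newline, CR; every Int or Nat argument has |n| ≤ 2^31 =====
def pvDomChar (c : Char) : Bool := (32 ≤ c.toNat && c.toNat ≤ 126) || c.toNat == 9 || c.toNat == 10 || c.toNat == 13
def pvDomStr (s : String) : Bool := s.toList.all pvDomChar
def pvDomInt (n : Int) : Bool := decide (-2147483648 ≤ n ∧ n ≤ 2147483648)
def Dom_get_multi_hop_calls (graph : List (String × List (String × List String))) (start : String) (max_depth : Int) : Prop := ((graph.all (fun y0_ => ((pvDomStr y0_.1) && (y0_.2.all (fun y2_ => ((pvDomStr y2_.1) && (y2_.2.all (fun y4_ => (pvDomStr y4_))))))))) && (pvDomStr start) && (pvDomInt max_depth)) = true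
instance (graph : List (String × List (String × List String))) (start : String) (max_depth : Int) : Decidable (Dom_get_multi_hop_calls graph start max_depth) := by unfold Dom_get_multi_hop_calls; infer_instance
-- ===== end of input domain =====

-- B re-implements the recursive depth-limited DFS as an iterative loop over an explicit
-- stack of (depth, callee) edges; same return value, different decomposition (no speed claim).

-- shared helper: graph.get(node, {}).get("calls", []) (appears verbatim in both Pythons)
def pvCalls (graph : List (String × List (String × List String))) (node : String) : List String :=
  PySem.Dict.getD (PySem.Dict.mk (PySem.Dict.getD (PySem.Dict.mk graph) node [])) "calls" []

-- ===== PORT A =====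
-- A's nested `dfs(node, depth)` with the captured mutable `visited`/`result` threaded as
-- state; the for-loop over the callees is the foldl over the same state.
-- The Nat budget b = (max_depth - depth + 1).toNat encodes A's `depth > max_depth` guard
-- (b = 0 exactly when depth > max_depth); the Int depth itself is still carried for the output.
def pvDfsA (graph : List (String × List (String × List String))) :
    Nat → String → Int → PySem.Set String → List (Int × String) →
    PySem.Set String × List (Int × String)
  | 0, _, _, vis, res => (vis, res)                    -- depth > max_depth: return
  | b + 1, node, depth, vis, res =>
    if vis.contains node then (vis, res)               -- node in visited: return
    else
      -- visited.add(node); for callee in calls: result.append((depth, callee)); dfs(callee, depth+1)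
      (pvCalls graph node).foldl
        (fun st callee => pvDfsA graph b callee (depth + 1) st.1 (st.2 ++ [(depth, callee)]))
        (PySem.Set.add vis node, res)

def get_multi_hop_calls (graph : List (String × List (String × List String))) (start : String) (max_depth : Int) : List (Int × String) :=
  (pvDfsA graph max_depth.toNat start 1 PySem.Set.empty []).2

-- ===== PORT B =====
-- width bound and the two decrease facts: used only by the termination proof of B's loop,
-- not by its algorithm
def pvWidth (graph : List (String × List (String × List String))) : Nat :=
  graph.foldr (fun p acc => max (PySem.Dict.getD (PySem.Dict.mk p.2) "calls" []).length acc) 0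

theorem pvGetD_mk_cons {κ ν : Type} [BEq κ] (p : κ × ν) (rest : List (κ × ν)) (k : κ) (d : ν) :
    (PySem.Dict.mk (p :: rest)).getD k d = if p.1 == k then p.2 else (PySem.Dict.mk rest).getD k d := by
  rw [PySem.Dict.getD, PySem.Dict.get?_mk_cons]
  by_cases h : p.1 == k
  · simp [h]
  · simp [h, PySem.Dict.getD]

theorem pvCalls_le_width (graph : List (String × List (String × List String))) (node : String) :
    (pvCalls graph node).length ≤ pvWidth graph := by
  induction graph with
  | nil => simp [pvCalls, pvWidth, PySem.Dict.getD, PySem.Dict.get?]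
  | cons p rest ih =>
    simp only [pvCalls, pvWidth, List.foldr] at ih ⊢
    rw [pvGetD_mk_cons]
    by_cases h : p.1 == node
    · rw [if_pos h]
      exact le_max_left _ _
    · rw [if_neg h]
      exact le_trans ih (le_max_right _ _)


-- small arithmetic helpers (kept tiny on purpose: proof terms are traversed by audits)
theorem pvAux_split {m d : Int} (h : d + 1 ≤ m) :
    (m - d).toNat = (m - (d + 1)).toNat + 1 := by
  have h0 : (0 : Int) ≤ m - (d + 1) := by linarith
  have h1 : m - d = (m - (d + 1)) + 1 := by ring
  rw [h1, Int.toNat_add h0 (by norm_num)]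
  rfl

theorem pvDecPop (graph : List (String × List (String × List String))) (maxd d : Int)
    (c : String) (rest : List (Int × String)) :
    ((rest.map (fun p => (pvWidth graph + 1) ^ (maxd - p.1).toNat)).sum)
      < ((((d, c) :: rest).map (fun p => (pvWidth graph + 1) ^ (maxd - p.1).toNat)).sum) := by
  have hp : 0 < (pvWidth graph + 1) ^ (maxd - d).toNat := Nat.pow_pos (Nat.succ_pos _)
  simp only [List.map_cons, List.sum_cons]
  exact Nat.lt_add_of_pos_left hp

theorem pvDecExpand (graph : List (String × List (String × List String))) (maxd d : Int)
    (c : String) (rest : List (Int × String)) (h : d + 1 ≤ maxd) :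
    ((((pvCalls graph c).map (fun x => (d + 1, x)) ++ rest).map
        (fun p => (pvWidth graph + 1) ^ (maxd - p.1).toNat)).sum)
      < ((((d, c) :: rest).map (fun p => (pvWidth graph + 1) ^ (maxd - p.1).toNat)).sum) := by
  have hp : 0 < (pvWidth graph + 1) ^ (maxd - (d + 1)).toNat := Nat.pow_pos (Nat.succ_pos _)
  have hm : (maxd - d).toNat = (maxd - (d + 1)).toNat + 1 := pvAux_split h
  simp only [List.map_append, List.map_map, List.map_cons, List.sum_append, List.sum_cons]
  have hconst : ((pvCalls graph c).map ((fun p : Int × String => (pvWidth graph + 1) ^ (maxd - p.1).toNat) ∘ fun x => (d + 1, x))).sum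
      = (pvCalls graph c).length * (pvWidth graph + 1) ^ (maxd - (d + 1)).toNat := by
    induction pvCalls graph c with
    | nil => simp
    | cons a l ihl => simp [ihl, Nat.succ_mul, Nat.add_comm]
  rw [hconst, hm, pow_succ]
  have h1 : (pvCalls graph c).length * (pvWidth graph + 1) ^ (maxd - (d + 1)).toNat
      ≤ pvWidth graph * (pvWidth graph + 1) ^ (maxd - (d + 1)).toNat :=
    Nat.mul_le_mul_right _ (pvCalls_le_width graph c)
  have h2 : pvWidth graph * (pvWidth graph + 1) ^ (maxd - (d + 1)).toNat
      < (pvWidth graph + 1) ^ (maxd - (d + 1)).toNat * (pvWidth graph + 1) := by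
    rw [Nat.mul_comm ((pvWidth graph + 1) ^ (maxd - (d + 1)).toNat) (pvWidth graph + 1)]
    exact (Nat.mul_lt_mul_right hp).mpr (Nat.lt_succ_self _)
  exact Nat.add_lt_add_right (Nat.lt_of_le_of_lt h1 h2) _

-- B's while-loop. Lean's list head is the TOP of the Python stack (Python appends/pops at the
-- end); Python's `for c in reversed(calls): stack.append(...)` is therefore prepending the
-- children in their original order.
def pvLoopB (graph : List (String × List (String × List String))) (maxd : Int)
    (vis : PySem.Set String) (res : List (Int × String)) (stack : List (Int × String)) :
    List (Int × String) :=
  match stack with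
  | [] => res
  | (d, c) :: rest =>
    let res' := res ++ [(d, c)]
    if _h : d + 1 ≤ maxd ∧ vis.contains c = false then
      pvLoopB graph maxd (PySem.Set.add vis c) res'
        ((pvCalls graph c).map (fun x => (d + 1, x)) ++ rest)
    else
      pvLoopB graph maxd vis res' rest
termination_by (stack.map (fun p => (pvWidth graph + 1) ^ (maxd - p.1).toNat)).sum
decreasing_by
  · exact pvDecExpand graph maxd d c rest _h.1
  · exact pvDecPop graph maxd d c rest

def get_multi_hop_calls_alt (graph : List (String × List (String × List String))) (start : String) (max_depth : Int) : List (Int × String) :=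
  if max_depth < 1 then []
  else
    pvLoopB graph max_depth (PySem.Set.ofList [start]) []
      ((pvCalls graph start).map (fun c => (1, c)))

-- ===== PRECONDITION & SPEC =====
def Spec_get_multi_hop_calls (graph : List (String × List (String × List String))) (start : String) (max_depth : Int) (out : List (Int × String)) : Prop := out = get_multi_hop_calls_alt graph start max_depth
instance (graph : List (String × List (String × List String))) (start : String) (max_depth : Int) (out : List (Int × String)) : Decidable (Spec_get_multi_hop_calls graph start max_depth out) := by unfold Spec_get_multi_hop_calls; infer_instance

-- ===== CLAIM (what is proved, stated in full; the proofs are below) =====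
def Claim_equal_get_multi_hop_calls : Prop := ∀ (graph : List (String × List (String × List String))) (start : String) (max_depth : Int), Dom_get_multi_hop_calls graph start max_depth → Spec_get_multi_hop_calls graph start max_depth (get_multi_hop_calls graph start max_depth)

-- ===== LEMMAS AND PROOFS =====

theorem pvAux_not_le {m d : Int} (hb : 0 = (m - d).toNat) (h1 : d + 1 ≤ m) : False := by
  have h2 : m - d ≤ 0 := Int.toNat_eq_zero.mp hb.symm
  linarith

theorem pvAux_succ {m d : Int} {b : Nat} (hb : b + 1 = (m - d).toNat) :
    d + 1 ≤ m ∧ b = (m - (d + 1)).toNat := by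
  have h2 : 0 < m - d := by
    by_contra h3
    rw [Int.toNat_eq_zero.mpr (not_lt.mp h3)] at hb
    exact Nat.succ_ne_zero b hb
  have h4 : ((b : Int) + 1) = m - d := by
    have h5 := Int.toNat_of_nonneg (le_of_lt h2)
    rw [← hb] at h5
    exact_mod_cast h5
  refine ⟨by linarith, ?_⟩
  have h6 : m - (d + 1) = (b : Int) := by linarith
  rw [h6, Int.toNat_natCast]


-- The loop invariant: draining one budget-b frame of pending children equals running A's
-- inner for-loop at the same depth, where b = (max_depth - depth).toNat is the remaining
-- budget with which each child is entered.
theorem pvLoop_eq_fold (graph : List (String × List (String × List String))) (maxd : Int) :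
    ∀ (b : Nat) (depth : Int), b = (maxd - depth).toNat →
    ∀ (calls : List String) (vis : PySem.Set String) (res rest : List (Int × String)),
    pvLoopB graph maxd vis res (calls.map (fun c => (depth, c)) ++ rest)
      = pvLoopB graph maxd
          (calls.foldl (fun st callee => pvDfsA graph b callee (depth + 1) st.1 (st.2 ++ [(depth, callee)])) (vis, res)).1
          (calls.foldl (fun st callee => pvDfsA graph b callee (depth + 1) st.1 (st.2 ++ [(depth, callee)])) (vis, res)).2
          rest := by
  intro b
  induction b with
  | zero =>
    intro depth hb calls
    induction calls with
    | nil => intro vis res rest; simp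
    | cons callee more ihc =>
      intro vis res rest
      have hnd : ¬ (depth + 1 ≤ maxd ∧ vis.contains callee = false) := by
        intro ⟨h1, _⟩; exact pvAux_not_le hb h1
      simp only [List.map_cons, List.cons_append, List.foldl_cons]
      rw [pvLoopB]
      rw [dif_neg hnd]
      rw [ihc]
      rfl
  | succ b' ih =>
    intro depth hb calls
    have hd1 : depth + 1 ≤ maxd := (pvAux_succ hb).1
    induction calls with
    | nil => intro vis res rest; simp
    | cons callee more ihc =>
      intro vis res rest
      simp only [List.map_cons, List.cons_append, List.foldl_cons]
      rw [pvLoopB]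
      by_cases hc : vis.contains callee = true
      · have hnd : ¬ (depth + 1 ≤ maxd ∧ vis.contains callee = false) := by
          intro ⟨_, h2⟩; rw [hc] at h2; exact Bool.noConfusion h2
        rw [dif_neg hnd]
        rw [ihc]
        have hst : pvDfsA graph (b' + 1) callee (depth + 1) vis (res ++ [(depth, callee)])
            = (vis, res ++ [(depth, callee)]) := by
          rw [pvDfsA, if_pos hc]
        rw [hst]
      · have hc : vis.contains callee = false := Bool.eq_false_iff.mpr hc
        have hd : depth + 1 ≤ maxd ∧ vis.contains callee = false := ⟨hd1, hc⟩
        rw [dif_pos hd]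
        have hb' : b' = (maxd - (depth + 1)).toNat := (pvAux_succ hb).2
        rw [ih (depth + 1) hb' (pvCalls graph callee) (PySem.Set.add vis callee)
            (res ++ [(depth, callee)]) (more.map (fun c => (depth, c)) ++ rest)]
        rw [ihc]
        have hst : pvDfsA graph (b' + 1) callee (depth + 1) vis (res ++ [(depth, callee)])
            = (pvCalls graph callee).foldl
                (fun st c => pvDfsA graph b' c (depth + 1 + 1) st.1 (st.2 ++ [(depth + 1, c)]))
                (PySem.Set.add vis callee, res ++ [(depth, callee)]) := by
          rw [pvDfsA, if_neg (by rw [hc]; exact Bool.noConfusion)]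
        rw [hst]

theorem get_multi_hop_calls_spec : Claim_equal_get_multi_hop_calls := by
  intro graph start maxd _
  unfold Spec_get_multi_hop_calls get_multi_hop_calls get_multi_hop_calls_alt
  by_cases h : maxd < 1
  · have h0 : maxd.toNat = 0 := Int.toNat_eq_zero.mpr (by linarith)
    rw [h0, if_pos h, pvDfsA]
  · have hm1 : (1 : Int) ≤ maxd := not_lt.mp h
    have h1 : maxd.toNat = (maxd - 1).toNat + 1 := by
      have h2 := pvAux_split (m := maxd) (d := 0) (by linarith)
      rw [sub_zero] at h2
      rw [h2, zero_add]
    rw [h1, if_neg h, pvDfsA]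
    rw [if_neg (by simp [PySem.Set.empty, PySem.Set.contains])]
    have hof : PySem.Set.ofList [start] = PySem.Set.add PySem.Set.empty start := rfl
    rw [hof]
    have heq := pvLoop_eq_fold graph maxd (maxd - 1).toNat 1 rfl (pvCalls graph start)
      (PySem.Set.add PySem.Set.empty start) [] []
    rw [List.append_nil] at heq
    rw [heq, pvLoopB]
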